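-- pv_equiv track=rewrite | github.com/Underflow/reinforcement-2048 | boardfeatures.py | get_histograms
-- ===== SOURCE A (Python) =====
-- def get_histograms(board):
--     xhisto = [0, 0, 0, 0]
--     yhisto = [0, 0, 0, 0]
--
--     for x in range(0, 4):
--         yhval = 0
--         for y in range(0, 4):
--             if board[x][y]:
--                 xhisto[y] += board[x][y]
--                 yhval += board[x][y]
--         yhisto[x] += yhval
--
--     return (xhisto, yhisto)
-- ===== SOURCE B (Python) =====
-- def get_histograms(board):
--     # Recursive decomposition: peel one row at a time; column sums are the
--     # componentwise vector sum of the rows (zip-add), row sums are built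
--     # back-to-front through the recursion. No in-place mutation, no zero guard.
--     def row4(i):
--         r = board[i]
--         return [r[0], r[1], r[2], r[3]]
--
--     def go(i):
--         if i == 4:
--             return ([0, 0, 0, 0], [])
--         xh, yh = go(i + 1)
--         r = row4(i)
--         return ([a + b for a, b in zip(r, xh)], [sum(r)] + yh)
--
--     return go(0)
-- ===== Notes on version B (the rewrite author's own statement) =====
-- stated objective: alternative
-- what changed: Replaces A's fused nested index loops with in-place histogram mutation and a zero guard by a recursion over the rows that computes column sums as a componentwise zip-add of the row vectors and builds the list of row sums back-to-front; the zero guard is dropped since adding zero is a no-op.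
import Mathlib
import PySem

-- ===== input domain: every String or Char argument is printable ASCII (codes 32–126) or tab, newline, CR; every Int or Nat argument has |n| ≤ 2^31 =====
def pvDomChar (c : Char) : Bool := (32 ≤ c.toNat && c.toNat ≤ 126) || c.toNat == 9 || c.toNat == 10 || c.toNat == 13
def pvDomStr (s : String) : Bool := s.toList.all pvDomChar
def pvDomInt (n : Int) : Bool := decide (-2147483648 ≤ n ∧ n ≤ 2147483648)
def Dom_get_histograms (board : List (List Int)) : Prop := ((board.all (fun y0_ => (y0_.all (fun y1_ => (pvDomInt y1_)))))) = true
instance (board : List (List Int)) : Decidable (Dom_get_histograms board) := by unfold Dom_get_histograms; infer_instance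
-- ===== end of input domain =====

-- B replaces A's fused nested index loops (in-place mutation, zero guard) by a recursion
-- over the rows: column sums via componentwise zip-add of row vectors, row sums built
-- back-to-front through the recursion.

-- ===== PORT A =====
-- the inner 'for y in range(0, 4)' loop of A: state (xhisto, yhval)
def innerLoopA (board : List (List Int)) (x : Int) (xh : List Int) : List Int × Int :=
  (PySem.List.pyRange 0 4 1).foldl (fun (st2 : List Int × Int) y =>
    let v := PySem.List.pyGetD (PySem.List.pyGetD board x []) y 0
    if v ≠ 0 then
      (st2.1.set y.toNat (PySem.List.pyGetD st2.1 y 0 + v), st2.2 + v)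
    else st2) (xh, (0 : Int))

-- the fused double loop: state (xhisto, yhisto)
def get_histograms (board : List (List Int)) : List Int × List Int :=
  let init : List Int × List Int := ([0, 0, 0, 0], [0, 0, 0, 0])
  (PySem.List.pyRange 0 4 1).foldl (fun (st : List Int × List Int) x =>
    let inner := innerLoopA board x st.1
    (inner.1, st.2.set x.toNat (PySem.List.pyGetD st.2 x 0 + inner.2))) init

-- ===== PORT B =====
-- the helper 'row4(i)' of Source B: the first four entries of row i
def row4B (board : List (List Int)) (i : Int) : List Int :=
  let r := PySem.List.pyGetD board i []
  [PySem.List.pyGetD r 0 0, PySem.List.pyGetD r 1 0,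
   PySem.List.pyGetD r 2 0, PySem.List.pyGetD r 3 0]

-- the recursive helper 'go(i)' of Source B; fuel n = 4 - i rows remaining
def goB (board : List (List Int)) : Nat → List Int × List Int
  | 0 => ([0, 0, 0, 0], [])
  | n + 1 =>
    let p := goB board n
    let r := row4B board ((3 - n : Nat) : Int)
    ((List.zip r p.1).map (fun q => q.1 + q.2), (r.foldl (· + ·) 0) :: p.2)

def get_histograms_alt (board : List (List Int)) : List Int × List Int :=
  goB board 4

-- ===== PRECONDITION & SPEC =====
-- Pre_ excludes exactly the boards on which A raises IndexError: fewer than 4 rows,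
-- or one of the first 4 rows shorter than 4.
def Pre_get_histograms (board : List (List Int)) : Prop :=
  4 ≤ board.length ∧ ∀ r ∈ board.take 4, 4 ≤ r.length
instance (board : List (List Int)) : Decidable (Pre_get_histograms board) := by
  unfold Pre_get_histograms; infer_instance

def pvWitness_get_histograms : List (List Int) :=
  [[1, 0, 2, 3], [0, 0, 4, 0], [5, 6, 0, 0], [7, 0, 0, 8]]

def Spec_get_histograms (board : List (List Int)) (out : List Int × List Int) : Prop :=
  out = get_histograms_alt board
instance (board : List (List Int)) (out : List Int × List Int) :
    Decidable (Spec_get_histograms board out) := by unfold Spec_get_histograms; infer_instance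

-- ===== CLAIM (what is proved, stated in full; the proofs are below) =====
def Claim_equal_get_histograms : Prop := ∀ (board : List (List Int)),
  Dom_get_histograms board → Pre_get_histograms board →
  Spec_get_histograms board (get_histograms board)

-- ===== LEMMAS AND PROOFS =====

-- a row of length ≥ 4 splits into 4 heads and a tail
lemma row_shape (r : List Int) (h : 4 ≤ r.length) :
    ∃ a b c d t, r = a :: b :: c :: d :: t := by
  match r with
  | a :: b :: c :: d :: t => exact ⟨a, b, c, d, t, rfl⟩
  | [] | [_] | [_, _] | [_, _, _] => simp at h

set_option maxHeartbeats 1600000 in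
-- the inner loop on a 4-element histogram adds the row's first four entries
-- componentwise and accumulates their sum (the zero guard is a no-op)
lemma inner4 (board : List (List Int)) (x : Int) (x0 x1 x2 x3 : Int) :
    innerLoopA board x [x0, x1, x2, x3]
    = (let row := PySem.List.pyGetD board x []
       ([x0 + PySem.List.pyGetD row 0 0, x1 + PySem.List.pyGetD row 1 0,
        x2 + PySem.List.pyGetD row 2 0, x3 + PySem.List.pyGetD row 3 0],
       PySem.List.pyGetD row 0 0 + PySem.List.pyGetD row 1 0
           + PySem.List.pyGetD row 2 0 + PySem.List.pyGetD row 3 0)) := by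
  unfold innerLoopA
  set row := PySem.List.pyGetD board x [] with hrow
  by_cases h0 : row[0]?.getD 0 = 0 <;>
  by_cases h1 : row[1]?.getD 0 = 0 <;>
  by_cases h2 : row[2]?.getD 0 = 0 <;>
  by_cases h3 : row[3]?.getD 0 = 0 <;>
    simp [PySem.List.pyRange, List.range_succ, PySem.List.pyGetD_ofNat', h0, h1, h2, h3]

-- ===== VERDICT (by name: the statement is the Claim_ definition above) =====
theorem get_histograms_spec : Claim_equal_get_histograms := by
  intro board _ hpre
  obtain ⟨hlen, hrows⟩ := hpre
  match board, hlen with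
  | r0 :: r1 :: r2 :: r3 :: rest, _ =>
    obtain ⟨a0, a1, a2, a3, t0, h0⟩ := row_shape r0 (hrows r0 (by simp))
    obtain ⟨b0, b1, b2, b3, t1, h1⟩ := row_shape r1 (hrows r1 (by simp))
    obtain ⟨c0, c1, c2, c3, t2, h2⟩ := row_shape r2 (hrows r2 (by simp))
    obtain ⟨d0, d1, d2, d3, t3, h3⟩ := row_shape r3 (hrows r3 (by simp))
    subst h0 h1 h2 h3
    show Spec_get_histograms _ _
    unfold Spec_get_histograms get_histograms get_histograms_alt
    simp [PySem.List.pyRange, List.range_succ, inner4,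
          PySem.List.pyGetD_ofNat', goB, row4B]
    refine ⟨by ring, by ring, by ring, by ring⟩
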